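-- pv_equiv track=rewrite | github.com/kks521/algorithm | programmers/level1/나누어 떨어지는 숫자 배열.py | solution
-- ===== SOURCE A (Python) =====
-- def solution(arr, divisor):
--     ans = []
--     for num in arr:
--         if num % divisor == 0:
--             ans.append(num)
--     if ans:
--         ans.sort()
--         return ans
--     return [-1]
-- ===== SOURCE B (Python) =====
-- def solution(arr, divisor):
--     res = []
--     for num in arr:
--         if num % divisor == 0:
--             i = 0
--             while i < len(res) and res[i] <= num:
--                 i += 1
--             res.insert(i, num)
--     return res if res else [-1]
-- ===== Notes on version B (the rewrite author's own statement) =====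
-- stated objective: alternative
-- what changed: B never calls sort: it maintains the result sorted at all times, inserting each divisible element at its position (online insertion sort) in a single pass, instead of A's filter-then-sort two-stage shape.
import Mathlib
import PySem

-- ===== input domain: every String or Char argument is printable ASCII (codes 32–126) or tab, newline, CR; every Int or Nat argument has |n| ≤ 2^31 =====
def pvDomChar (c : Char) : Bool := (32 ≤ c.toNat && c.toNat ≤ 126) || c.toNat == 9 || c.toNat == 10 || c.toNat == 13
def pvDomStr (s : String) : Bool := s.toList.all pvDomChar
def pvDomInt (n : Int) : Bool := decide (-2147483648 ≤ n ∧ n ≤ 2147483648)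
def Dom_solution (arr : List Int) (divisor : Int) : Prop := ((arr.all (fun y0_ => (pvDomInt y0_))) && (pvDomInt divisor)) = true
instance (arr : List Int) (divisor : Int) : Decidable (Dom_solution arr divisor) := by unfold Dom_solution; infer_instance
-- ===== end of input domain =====

-- B keeps its result sorted at all times, inserting each divisible element in place
-- during a single pass (online insertion sort), instead of A's filter-then-sort.


-- ===== PORT A =====
def solution (arr : List Int) (divisor : Int) : List Int :=
  let ans := arr.foldl (fun ans num => if PySem.Int.mod num divisor = 0 then ans ++ [num] else ans) []
  if ans ≠ [] then PySem.List.sorted ans (fun x => x) false else [-1]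

-- ===== PORT B =====
-- the while/insert loop of Source B: skip elements ≤ num, insert num before the first larger one
def pvIns (num : Int) : List Int → List Int
  | [] => [num]
  | x :: xs => if x ≤ num then x :: pvIns num xs else num :: x :: xs

def solution_alt (arr : List Int) (divisor : Int) : List Int :=
  let res := arr.foldl (fun res num => if PySem.Int.mod num divisor = 0 then pvIns num res else res) []
  if res ≠ [] then res else [-1]

-- ===== PRECONDITION & SPEC =====
-- Pre_ excludes divisor = 0 with a nonempty arr, where both Pythons raise ZeroDivisionError on '%'.
def Pre_solution (arr : List Int) (divisor : Int) : Prop := divisor ≠ 0 ∨ arr = []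
instance (arr : List Int) (divisor : Int) : Decidable (Pre_solution arr divisor) := by unfold Pre_solution; infer_instance
def pvWitness_solution : List Int × Int := ([5, 3, 10], 5)

def Spec_solution (arr : List Int) (divisor : Int) (out : List Int) : Prop := out = solution_alt arr divisor
instance (arr : List Int) (divisor : Int) (out : List Int) : Decidable (Spec_solution arr divisor out) := by unfold Spec_solution; infer_instance

-- ===== CLAIM (what is proved, stated in full; the proofs are below) =====
def Claim_equal_solution : Prop := ∀ (arr : List Int) (divisor : Int), Dom_solution arr divisor → Pre_solution arr divisor → Spec_solution arr divisor (solution arr divisor)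

-- ===== LEMMAS AND PROOFS =====

theorem pvIns_perm (num : Int) (l : List Int) : (pvIns num l).Perm (num :: l) := by
  induction l with
  | nil => simp [pvIns]
  | cons x xs ih =>
    simp only [pvIns]
    split_ifs
    · exact ((ih.cons x).trans (List.Perm.swap num x xs))
    · exact List.Perm.refl _

theorem pvIns_pairwise (num : Int) (l : List Int) (h : l.Pairwise (· ≤ ·)) :
    (pvIns num l).Pairwise (· ≤ ·) := by
  induction l with
  | nil => simp [pvIns]
  | cons x xs ih =>
    rcases List.pairwise_cons.mp h with ⟨hx, hxs⟩
    simp only [pvIns]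
    split_ifs with hle
    · refine List.pairwise_cons.mpr ⟨?_, ih hxs⟩
      intro b hb
      rcases List.mem_cons.mp ((pvIns_perm num xs).mem_iff.mp hb) with h1 | h1
      · exact h1 ▸ hle
      · exact hx b h1
    · refine List.pairwise_cons.mpr ⟨?_, h⟩
      intro b hb
      rcases List.mem_cons.mp hb with h1 | h1
      · omega
      · exact le_trans (by omega) (hx b h1)

-- the foldl of B is a ≤-sorted permutation of the filter
theorem pvFold_spec (divisor : Int) (arr : List Int) :
    (arr.foldl (fun res num => if PySem.Int.mod num divisor = 0 then pvIns num res else res) []).Perm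
      (arr.filter (fun num => decide (PySem.Int.mod num divisor = 0)))
    ∧ (arr.foldl (fun res num => if PySem.Int.mod num divisor = 0 then pvIns num res else res) []).Pairwise (· ≤ ·) := by
  suffices h : ∀ (l : List Int) (acc : List Int),
      acc.Pairwise (· ≤ ·) →
      (l.foldl (fun res num => if PySem.Int.mod num divisor = 0 then pvIns num res else res) acc).Perm
        (acc ++ l.filter (fun num => decide (PySem.Int.mod num divisor = 0)))
      ∧ (l.foldl (fun res num => if PySem.Int.mod num divisor = 0 then pvIns num res else res) acc).Pairwise (· ≤ ·) by
    simpa using h arr [] (by simp)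
  intro l
  induction l with
  | nil => intro acc hp; simpa using hp
  | cons x xs ih =>
    intro acc hp
    simp only [List.foldl_cons, List.filter_cons]
    by_cases hx : PySem.Int.mod x divisor = 0
    · rw [if_pos hx]
      simp only [hx, decide_true, if_true]
      obtain ⟨hperm, hpair⟩ := ih (pvIns x acc) (pvIns_pairwise x acc hp)
      refine ⟨hperm.trans ?_, hpair⟩
      exact ((pvIns_perm x acc).append_right _).trans List.perm_middle.symm
    · rw [if_neg hx]
      simp only [hx, decide_false]
      exact ih acc hp

theorem pv_if_key (F R : List Int) (hp : R.Perm F) (hq : R.Pairwise (· ≤ ·)) :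
    (if F ≠ [] then PySem.List.sorted F (fun x => x) false else [-1])
      = (if R ≠ [] then R else [-1]) := by
  rw [PySem.List.sorted_id_eq_of_perm_of_pairwise _ _ hp hq]
  have hiff : (F = []) ↔ (R = []) := by
    constructor <;> intro h
    · exact (h ▸ hp).eq_nil
    · exact (h ▸ hp.symm).eq_nil
  simp only [ne_eq, hiff]

theorem solution_spec : Claim_equal_solution := by
  intro arr divisor _ _
  show solution arr divisor = solution_alt arr divisor
  obtain ⟨hperm, hpair⟩ := pvFold_spec divisor arr
  simp only [solution, solution_alt, PySem.List.foldl_append_ite_eq_filter, List.nil_append]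
  exact pv_if_key _ _ hperm hpair
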